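-- pv_equiv track=rewrite | github.com/xliry/desloppify | desloppify/intelligence/narrative/strategy_engine_lanes.py | _group_by_file_overlap
-- ===== SOURCE A (Python) =====
-- from typing import Any
--
-- def _group_by_file_overlap(
--     action_files: list[tuple[dict[str, Any], set[str]]],
-- ) -> list[list[tuple[dict[str, Any], set[str]]]]:
--     """Group actions whose file sets overlap using union-find."""
--     item_count = len(action_files)
--     if item_count == 0:
--         return []
--
--     parent = list(range(item_count))
--
--     def find(index: int) -> int:
--         while parent[index] != index:
--             parent[index] = parent[parent[index]]
--             index = parent[index]
--         return index
--
--     def union(left: int, right: int) -> None: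
--         left_root, right_root = find(left), find(right)
--         if left_root != right_root:
--             parent[left_root] = right_root
--
--     for left in range(item_count):
--         for right in range(left + 1, item_count):
--             if action_files[left][1] & action_files[right][1]:
--                 union(left, right)
--
--     grouped_indices: dict[int, list[int]] = {}
--     for index in range(item_count):
--         grouped_indices.setdefault(find(index), []).append(index)
--
--     return [
--         [action_files[index] for index in indices]
--         for indices in grouped_indices.values()
--     ]
-- ===== SOURCE B (Python) =====
-- def _merge_labels(label, li, lj):
--     """Coalesce the two label classes li and lj onto the smaller label."""
--     if li != lj:
--         lo, hi = (li, lj) if li < lj else (lj, li)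
--         label = [lo if x == hi else x for x in label]
--     return label
--
--
-- def _group_by_file_overlap(action_files):
--     """Group actions whose file sets overlap, via an inverted file->first-owner
--     index and min-label class merging (no pairwise set intersections)."""
--     n = len(action_files)
--     label = list(range(n))
--     first_owner = {}
--     for i, (_, files) in enumerate(action_files):
--         for f in files:
--             if f in first_owner:
--                 label = _merge_labels(label, label[i], label[first_owner[f]])
--             else:
--                 first_owner[f] = i
--     groups = {}
--     for i in range(n):
--         groups.setdefault(label[i], []).append(i)
--     return [[action_files[i] for i in g] for g in groups.values()]
-- ===== Notes on version B (the rewrite author's own statement) =====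
-- stated objective: faster
-- what changed: Replaced the O(n^2) all-pairs set-intersection loop plus path-compressed union-find with a single pass over an inverted file->first-owner index that coalesces min-label classes, so no pairwise intersections and no parent-pointer forest remain.
import Mathlib
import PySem

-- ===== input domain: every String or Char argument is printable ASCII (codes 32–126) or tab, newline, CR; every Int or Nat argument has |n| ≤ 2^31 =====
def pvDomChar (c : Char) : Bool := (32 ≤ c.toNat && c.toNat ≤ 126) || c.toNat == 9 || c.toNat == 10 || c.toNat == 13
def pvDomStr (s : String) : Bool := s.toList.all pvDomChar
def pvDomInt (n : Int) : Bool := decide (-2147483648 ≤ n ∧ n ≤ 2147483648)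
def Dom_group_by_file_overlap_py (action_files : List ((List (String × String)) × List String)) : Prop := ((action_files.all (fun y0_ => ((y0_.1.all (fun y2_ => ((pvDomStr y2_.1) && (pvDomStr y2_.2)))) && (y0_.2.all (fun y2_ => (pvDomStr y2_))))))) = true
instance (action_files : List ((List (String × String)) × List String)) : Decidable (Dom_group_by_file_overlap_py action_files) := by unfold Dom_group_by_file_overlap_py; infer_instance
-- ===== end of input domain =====

-- B replaces A's O(n^2) all-pairs set intersections + path-compressed union-find by one pass
-- over an inverted file -> first-owner index with min-label class merging (faster; same output).



-- ===== PORT A =====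
-- find(): while-loop with path compression; fuel = len(parent) totalizes the loop (never exhausted on reachable states)
def pvFindA (parent : List Int) (index : Int) : Nat → List Int × Int
  | 0 => (parent, index)
  | fuel+1 =>
    match PySem.List.pyGet? parent index with
    | none => (parent, index)
    | some p =>
      if p = index then (parent, index)
      else
        match PySem.List.pyGet? parent p with
        | none => (parent, index)
        | some gp => pvFindA (PySem.List.pySetD parent index gp) gp fuel

-- union(): two finds, then re-point the left root at the right root
def pvUnionA (parent : List Int) (left right : Int) : List Int :=
  let r1 := pvFindA parent left parent.length
  let r2 := pvFindA r1.1 right r1.1.length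
  if r1.2 ≠ r2.2 then PySem.List.pySetD r2.1 r1.2 r2.2 else r2.1

def group_by_file_overlap_py (action_files : List ((List (String × String)) × List String)) : List (List ((List (String × String)) × List String)) :=
  let item_count : Int := action_files.length
  if item_count = 0 then []
  else
    let parent0 := PySem.List.pyRange 0 item_count 1
    let parent1 := (PySem.List.pyRange 0 item_count 1).foldl (fun par left =>
      (PySem.List.pyRange (left+1) item_count 1).foldl (fun par right =>
        if PySem.Set.inter (PySem.List.pyGetD action_files left ([],[])).2
            (PySem.List.pyGetD action_files right ([],[])).2 ≠ [] then
          pvUnionA par left right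
        else par) par) parent0
    let st := (PySem.List.pyRange 0 item_count 1).foldl
      (fun (st : List Int × PySem.Dict Int (List Int)) index =>
        let fr := pvFindA st.1 index st.1.length
        (fr.1, st.2.modify fr.2 [] (fun l => l ++ [index])))
      (parent1, PySem.Dict.mk [])
    st.2.values.map (fun indices => indices.map (fun index => PySem.List.pyGetD action_files index ([],[])))

-- ===== PORT B =====
def pvMergeLabels (label : List Int) (li lj : Int) : List Int :=
  if li ≠ lj then
    let lo := if li < lj then li else lj
    let hi := if li < lj then lj else li
    label.map (fun x => if x = hi then lo else x)
  else label

def group_by_file_overlap_py_alt (action_files : List ((List (String × String)) × List String)) : List (List ((List (String × String)) × List String)) :=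
  let n : Int := action_files.length
  let st := (PySem.List.enumerate action_files 0).foldl
    (fun (st : List Int × PySem.Dict String Int) p =>
      p.2.2.foldl (fun (st : List Int × PySem.Dict String Int) f =>
        match st.2.get? f with
        | some j => (pvMergeLabels st.1 (PySem.List.pyGetD st.1 p.1 0) (PySem.List.pyGetD st.1 j 0), st.2)
        | none => (st.1, st.2.insert f p.1)) st)
    (PySem.List.pyRange 0 n 1, PySem.Dict.mk [])
  let groups := (PySem.List.pyRange 0 n 1).foldl
    (fun d i => d.modify (PySem.List.pyGetD st.1 i 0) [] (fun g => g ++ [i]))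
    (PySem.Dict.mk ([] : List (Int × List Int)))
  groups.values.map (fun g => g.map (fun i => PySem.List.pyGetD action_files i ([],[])))

-- ===== PRECONDITION & SPEC =====
def Spec_group_by_file_overlap_py (action_files : List ((List (String × String)) × List String)) (out : List (List ((List (String × String)) × List String))) : Prop := out = group_by_file_overlap_py_alt action_files
instance (action_files : List ((List (String × String)) × List String)) (out : List (List ((List (String × String)) × List String))) : Decidable (Spec_group_by_file_overlap_py action_files out) := by unfold Spec_group_by_file_overlap_py; infer_instance

-- ===== CLAIM (what is proved, stated in full; the proofs are below) =====
def Claim_equal_group_by_file_overlap_py : Prop := ∀ (action_files : List ((List (String × String)) × List String)), Dom_group_by_file_overlap_py action_files → Spec_group_by_file_overlap_py action_files (group_by_file_overlap_py action_files)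

-- ===== LEMMAS AND PROOFS =====
-- ===== union-find theory =====
def pvPf (p : List Int) (i : Nat) : Nat := (p.getD i 0).toNat

def pvWF (p : List Int) : Prop :=
  (∀ i, i < p.length → 0 ≤ p.getD i 0 ∧ pvPf p i < p.length) ∧
  (∀ i, i < p.length → ∃ k, pvPf p ((pvPf p)^[k] i) = (pvPf p)^[k] i)

def pvRootGo (p : List Int) : Nat → Nat → Nat
  | 0, i => i
  | k+1, i => if pvPf p i = i then i else pvRootGo p k (pvPf p i)

def pvRoot (p : List Int) (i : Nat) : Nat := pvRootGo p p.length i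

lemma pvPf_lt {p : List Int} (hwf : pvWF p) {i : Nat} (hi : i < p.length) :
    pvPf p i < p.length := (hwf.1 i hi).2

lemma pvIter_lt {p : List Int} (hwf : pvWF p) {i : Nat} (hi : i < p.length) :
    ∀ k, (pvPf p)^[k] i < p.length := by
  intro k
  induction k with
  | zero => simpa using hi
  | succ k ih => rw [Function.iterate_succ_apply']; exact pvPf_lt hwf ih

lemma pvStab {p : List Int} {i d : Nat} (hd : pvPf p ((pvPf p)^[d] i) = (pvPf p)^[d] i)
    {m : Nat} (hm : d ≤ m) : (pvPf p)^[m] i = (pvPf p)^[d] i := by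
  obtain ⟨t, rfl⟩ := Nat.exists_eq_add_of_le hm
  rw [Nat.add_comm, Function.iterate_add_apply]
  exact Function.iterate_fixed hd t

lemma pvCyc {p : List Int} {i c d : Nat} (hc : (pvPf p)^[c] i = i) (hc0 : 0 < c)
    (hd : pvPf p ((pvPf p)^[d] i) = (pvPf p)^[d] i) : pvPf p i = i := by
  have hper : ∀ m, (pvPf p)^[c * m] i = i := by
    intro m
    induction m with
    | zero => simp
    | succ m ih => rw [Nat.mul_succ, Function.iterate_add_apply, hc, ih]
  have h1 : (pvPf p)^[c * d + c] i = (pvPf p)^[d] i := by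
    have : d ≤ c * d + c := by nlinarith
    exact pvStab hd this
  have h2 : (pvPf p)^[c * d + c] i = i := by
    have := hper (d + 1); rwa [Nat.mul_add, Nat.mul_one] at this
  have h3 : (pvPf p)^[d] i = i := by rw [← h1, h2]
  rw [h3] at hd
  exact hd

lemma pvExists_root_lt {p : List Int} (hwf : pvWF p) {i : Nat} (hi : i < p.length) :
    ∃ d, d < p.length ∧ pvPf p ((pvPf p)^[d] i) = (pvPf p)^[d] i := by
  have h := hwf.2 i hi
  set d0 := Nat.find h with hd0
  have hroot : pvPf p ((pvPf p)^[d0] i) = (pvPf p)^[d0] i := Nat.find_spec h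
  have hmin : ∀ j, j < d0 → ¬ pvPf p ((pvPf p)^[j] i) = (pvPf p)^[j] i :=
    fun j hj => Nat.find_min h hj
  refine ⟨d0, ?_, hroot⟩
  by_contra hge
  -- injectivity of j ↦ f^[j] i on range (d0+1)
  have key : ∀ a b, a < b → b ≤ d0 → (pvPf p)^[a] i = (pvPf p)^[b] i → False := by
    intro a b hab hbd0 heq
    have hcyc : (pvPf p)^[b - a] ((pvPf p)^[a] i) = (pvPf p)^[a] i := by
      rw [← Function.iterate_add_apply]
      have : b - a + a = b := by omega
      rw [this, ← heq]
    have hreach : pvPf p ((pvPf p)^[d0 - a] ((pvPf p)^[a] i)) = (pvPf p)^[d0 - a] ((pvPf p)^[a] i) := by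
      rw [← Function.iterate_add_apply]
      have : d0 - a + a = d0 := by omega
      rw [this]; exact hroot
    have hr := pvCyc hcyc (by omega) hreach
    exact hmin a (by omega) hr
  have hinj : Set.InjOn (fun j => (pvPf p)^[j] i) ↑(Finset.range (d0 + 1)) := by
    intro a ha b hb hab
    simp only [Finset.coe_range, Set.mem_Iio] at ha hb
    by_contra hne
    rcases lt_or_gt_of_ne hne with h | h
    · exact key a b h (by omega) hab
    · exact key b a h (by omega) hab.symm
  have hmaps : Set.MapsTo (fun j => (pvPf p)^[j] i) ↑(Finset.range (d0 + 1)) ↑(Finset.range p.length) := by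
    intro a _ ; simp only [Finset.coe_range, Set.mem_Iio]
    exact pvIter_lt hwf hi a
  have := Finset.card_le_card_of_injOn _ hmaps hinj
  simp only [Finset.card_range] at this
  omega

lemma pvRootGo_eq {p : List Int} {i d : Nat}
    (hd : pvPf p ((pvPf p)^[d] i) = (pvPf p)^[d] i) :
    ∀ {k : Nat}, d ≤ k → pvRootGo p k i = (pvPf p)^[d] i := by
  induction d generalizing i with
  | zero =>
    intro k _
    simp only [Function.iterate_zero, id_eq] at hd ⊢
    induction k with
    | zero => rfl
    | succ k ih => simp [pvRootGo, hd]
  | succ d ih =>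
    intro k hk
    by_cases hroot : pvPf p i = i
    · have : (pvPf p)^[d+1] i = i := Function.iterate_fixed hroot _
      rw [this]
      clear hd ih hk this
      induction k with
      | zero => rfl
      | succ k ih => simp [pvRootGo, hroot]
    · obtain ⟨k', rfl⟩ : ∃ k', k = k' + 1 := ⟨k - 1, by omega⟩
      rw [pvRootGo, if_neg hroot]
      have hd' : pvPf p ((pvPf p)^[d] (pvPf p i)) = (pvPf p)^[d] (pvPf p i) := by
        rw [← Function.iterate_succ_apply]; exact hd
      rw [ih hd' (by omega), ← Function.iterate_succ_apply]

lemma pvRoot_eq_iter {p : List Int} (hwf : pvWF p) {i d : Nat} (hi : i < p.length)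
    (hd : pvPf p ((pvPf p)^[d] i) = (pvPf p)^[d] i) : pvRoot p i = (pvPf p)^[d] i := by
  obtain ⟨d0, hd0lt, hd0⟩ := pvExists_root_lt hwf hi
  have h1 : pvRoot p i = (pvPf p)^[d0] i := pvRootGo_eq hd0 (by omega)
  have h2 : (pvPf p)^[max d d0] i = (pvPf p)^[d] i := pvStab hd (Nat.le_max_left _ _)
  have h3 : (pvPf p)^[max d d0] i = (pvPf p)^[d0] i := pvStab hd0 (Nat.le_max_right _ _)
  rw [h1, ← h2, h3]

lemma pvRoot_isRoot {p : List Int} (hwf : pvWF p) {i : Nat} (hi : i < p.length) :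
    pvPf p (pvRoot p i) = pvRoot p i := by
  obtain ⟨d0, _, hd0⟩ := pvExists_root_lt hwf hi
  rw [pvRoot_eq_iter hwf hi hd0]; exact hd0

lemma pvRoot_lt {p : List Int} (hwf : pvWF p) {i : Nat} (hi : i < p.length) :
    pvRoot p i < p.length := by
  obtain ⟨d0, _, hd0⟩ := pvExists_root_lt hwf hi
  rw [pvRoot_eq_iter hwf hi hd0]; exact pvIter_lt hwf hi d0

lemma pvRoot_of_isRoot {p : List Int} (hwf : pvWF p) {i : Nat} (hi : i < p.length)
    (h : pvPf p i = i) : pvRoot p i = i :=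
  pvRoot_eq_iter hwf hi (d := 0) (by simpa using h)

lemma pvRoot_step {p : List Int} (hwf : pvWF p) {i : Nat} (hi : i < p.length) :
    pvRoot p (pvPf p i) = pvRoot p i := by
  by_cases hroot : pvPf p i = i
  · rw [hroot]
  · obtain ⟨d0, hd0lt, hd0⟩ := pvExists_root_lt hwf hi
    have hd0pos : d0 ≠ 0 := by
      intro h; rw [h] at hd0; simp at hd0; exact hroot hd0
    have hwit : pvPf p ((pvPf p)^[d0 - 1] (pvPf p i)) = (pvPf p)^[d0 - 1] (pvPf p i) := by
      rw [← Function.iterate_succ_apply, Nat.succ_eq_add_one]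
      have h11 : d0 - 1 + 1 = d0 := by omega
      rw [h11]; exact hd0
    rw [pvRoot_eq_iter hwf (pvPf_lt hwf hi) hwit,
        pvRoot_eq_iter hwf hi hd0, ← Function.iterate_succ_apply]
    congr 1; omega

lemma pvPf_set {p : List Int} {x : Nat} (hx : x < p.length) (y z : Nat) :
    pvPf (p.set x ((y : Nat) : Int)) z = if z = x then y else pvPf p z := by
  unfold pvPf
  by_cases hz : z = x
  · subst hz
    rw [List.getD_eq_getElem?_getD, List.getElem?_set_self (by omega)]
    simp
  · rw [List.getD_eq_getElem?_getD, List.getElem?_set_ne (by omega),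
        ← List.getD_eq_getElem?_getD]
    simp [hz]

lemma pvIter_set_eq {p : List Int} {x y e : Nat} (hx : x < p.length)
    (havoid : ∀ j, j ≤ e → (pvPf p)^[j] y ≠ x) :
    ∀ j, j ≤ e → (pvPf (p.set x ((y : Nat) : Int)))^[j] y = (pvPf p)^[j] y := by
  intro j hj
  induction j with
  | zero => rfl
  | succ j ih =>
    rw [Function.iterate_succ_apply', Function.iterate_succ_apply', ih (by omega),
        pvPf_set hx, if_neg (havoid j (by omega))]

lemma pvWF_set {p : List Int} {x y : Nat} (hwf : pvWF p) (hx : x < p.length)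
    (hy : y < p.length) {e : Nat}
    (he : pvPf p ((pvPf p)^[e] y) = (pvPf p)^[e] y)
    (havoid : ∀ j, j ≤ e → (pvPf p)^[j] y ≠ x) :
    pvWF (p.set x ((y : Nat) : Int)) := by
  have hlen : (p.set x ((y : Nat) : Int)).length = p.length := List.length_set ..
  constructor
  · intro i hi
    rw [hlen] at hi
    have h2 := pvPf_set hx y i
    by_cases hix : i = x
    · subst hix
      rw [if_pos rfl] at h2
      constructor
      · rw [List.getD_eq_getElem?_getD, List.getElem?_set_self (by omega)]; simp
      · rw [h2, hlen]; exact hy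
    · rw [if_neg hix] at h2
      constructor
      · rw [List.getD_eq_getElem?_getD, List.getElem?_set_ne (by omega),
            ← List.getD_eq_getElem?_getD]
        exact (hwf.1 i hi).1
      · rw [h2, hlen]; exact (hwf.1 i hi).2
  · rw [hlen]
    have QA : ∀ d j, j < p.length → pvPf p ((pvPf p)^[d] j) = (pvPf p)^[d] j →
        ∃ k, pvPf (p.set x ((y : Nat) : Int)) ((pvPf (p.set x ((y : Nat) : Int)))^[k] j)
          = (pvPf (p.set x ((y : Nat) : Int)))^[k] j := by
      intro d
      induction d using Nat.strong_induction_on with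
      | _ d ih =>
        intro j hj hjd
        by_cases hjx : j = x
        · subst hjx
          refine ⟨e + 1, ?_⟩
          have h1 : (pvPf (p.set j ((y : Nat) : Int)))^[e+1] j
              = (pvPf (p.set j ((y : Nat) : Int)))^[e] (pvPf (p.set j ((y : Nat) : Int)) j) :=
            Function.iterate_succ_apply ..
          have hfx : pvPf (p.set j ((y : Nat) : Int)) j = y := by
            rw [pvPf_set hj, if_pos rfl]
          have h2 : (pvPf (p.set j ((y : Nat) : Int)))^[e] y = (pvPf p)^[e] y :=
            pvIter_set_eq hj havoid e le_rfl
          rw [h1, hfx, h2]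
          have h3 := pvPf_set hj y ((pvPf p)^[e] y)
          rw [if_neg (havoid e le_rfl)] at h3
          rw [h3]
          exact he
        · by_cases hroot : pvPf p j = j
          · refine ⟨0, ?_⟩
            simpa [pvPf_set hx, hjx] using hroot
          · obtain ⟨d', rfl⟩ : ∃ d', d = d' + 1 := by
              refine ⟨d - 1, ?_⟩
              rcases Nat.eq_zero_or_pos d with h | h
              · subst h; simp at hjd; exact absurd hjd hroot
              · omega
            rw [Function.iterate_succ_apply] at hjd
            obtain ⟨k, hk⟩ := ih d' (by omega) (pvPf p j) (pvPf_lt hwf hj) hjd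
            refine ⟨k + 1, ?_⟩
            have hfj : pvPf (p.set x ((y : Nat) : Int)) j = pvPf p j := by
              rw [pvPf_set hx, if_neg hjx]
            rw [Function.iterate_succ_apply, hfj]
            exact hk
    intro i hi
    obtain ⟨d, hd⟩ := hwf.2 i hi
    exact QA d i hi hd

lemma pvRoot_set {p : List Int} {x y : Nat} (hwf : pvWF p) (hx : x < p.length)
    (hy : y < p.length) {e : Nat}
    (he : pvPf p ((pvPf p)^[e] y) = (pvPf p)^[e] y)
    (havoid : ∀ j, j ≤ e → (pvPf p)^[j] y ≠ x)
    (hcase : pvPf p x = x ∨ pvRoot p y = pvRoot p x) :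
    ∀ j, j < p.length → pvRoot (p.set x ((y : Nat) : Int)) j =
      if pvRoot p j = pvRoot p x then pvRoot p y else pvRoot p j := by
  set p' := p.set x ((y : Nat) : Int) with hp'
  have hwf' : pvWF p' := pvWF_set hwf hx hy he havoid
  have hlen : p'.length = p.length := List.length_set ..
  have hrooty' : pvRoot p' y = pvRoot p y := by
    have hwit : pvPf p' ((pvPf p')^[e] y) = (pvPf p')^[e] y := by
      rw [pvIter_set_eq hx havoid e le_rfl, pvPf_set hx, if_neg (havoid e le_rfl)]
      exact he
    rw [pvRoot_eq_iter hwf' (by omega) hwit, pvIter_set_eq hx havoid e le_rfl,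
        pvRoot_eq_iter hwf (by omega) he]
  have Q2 : ∀ d j, j < p.length → pvPf p ((pvPf p)^[d] j) = (pvPf p)^[d] j →
      pvRoot p' j = if pvRoot p j = pvRoot p x then pvRoot p y else pvRoot p j := by
    intro d
    induction d using Nat.strong_induction_on with
    | _ d ih =>
      intro j hj hjd
      by_cases hjx : j = x
      · subst hjx
        have h1 : pvRoot p' j = pvRoot p' y := by
          have := pvRoot_step hwf' (i := j) (by omega)
          rw [pvPf_set hx, if_pos rfl] at this
          exact this.symm
        rw [h1, hrooty', if_pos rfl]
      · by_cases hroot : pvPf p j = j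
        · have hL : pvRoot p' j = j :=
            pvRoot_of_isRoot hwf' (by omega) (by rw [pvPf_set hx, if_neg hjx]; exact hroot)
        
          have hRj : pvRoot p j = j := pvRoot_of_isRoot hwf hj hroot
          by_cases hcond : pvRoot p j = pvRoot p x
          · rcases hcase with h1 | h2
            · exfalso
              have : pvRoot p x = x := pvRoot_of_isRoot hwf hx h1
              rw [this] at hcond
              rw [hRj] at hcond
              exact hjx hcond
            · rw [hL, if_pos hcond, h2, ← hcond, hRj]
          · rw [hL, if_neg hcond, hRj]
        · obtain ⟨d', rfl⟩ : ∃ d', d = d' + 1 := by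
            refine ⟨d - 1, ?_⟩
            rcases Nat.eq_zero_or_pos d with h | h
            · subst h; simp at hjd; exact absurd hjd hroot
            · omega
          rw [Function.iterate_succ_apply] at hjd
          have hstep' : pvRoot p' j = pvRoot p' (pvPf p j) := by
            have := pvRoot_step hwf' (i := j) (by omega)
            rw [pvPf_set hx, if_neg hjx] at this
            exact this.symm
          have hstep : pvRoot p (pvPf p j) = pvRoot p j := pvRoot_step hwf hj
          rw [hstep', ih d' (by omega) (pvPf p j) (pvPf_lt hwf hj) hjd, hstep]
  intro j hj
  obtain ⟨d, hd⟩ := hwf.2 j hj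
  exact Q2 d j hj hd

lemma pvGetElem_eq_pf {p : List Int} (hwf : pvWF p) {i : Nat} (hi : i < p.length) :
    p[i] = ((pvPf p i : Nat) : Int) := by
  have h1 : p.getD i 0 = p[i] := by
    rw [List.getD_eq_getElem?_getD, List.getElem?_eq_getElem hi]; rfl
  have h2 := (hwf.1 i hi).1
  rw [h1] at h2
  unfold pvPf
  rw [h1, Int.toNat_of_nonneg h2]

lemma pvFindA_spec : ∀ d (p : List Int) (i fuel : Nat), pvWF p → i < p.length →
    pvPf p ((pvPf p)^[d] i) = (pvPf p)^[d] i → d ≤ fuel →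
    (pvFindA p ((i : Nat) : Int) fuel).2 = ((pvRoot p i : Nat) : Int) ∧
    pvWF (pvFindA p ((i : Nat) : Int) fuel).1 ∧
    (pvFindA p ((i : Nat) : Int) fuel).1.length = p.length ∧
    ∀ j, j < p.length → pvRoot (pvFindA p ((i : Nat) : Int) fuel).1 j = pvRoot p j := by
  intro d
  induction d using Nat.strong_induction_on with
  | _ d ih =>
    intro p i fuel hwf hi hd hfuel
    by_cases hroot : pvPf p i = i
    · -- find returns immediately (or fuel = 0 with d = 0)
      have hret : pvFindA p ((i : Nat) : Int) fuel = (p, ((i : Nat) : Int)) := by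
        cases fuel with
        | zero => rfl
        | succ fuel =>
          rw [pvFindA, PySem.List.pyGet?_natCast, List.getElem?_eq_getElem hi]
          rw [pvGetElem_eq_pf hwf hi, hroot]
          simp
      rw [hret]
      refine ⟨?_, hwf, rfl, fun j _ => rfl⟩
      simp [pvRoot_of_isRoot hwf hi hroot]
    · -- at least one compression step
      have hd0 : d ≠ 0 := by
        intro h; rw [h] at hd; simp at hd; exact hroot hd
      obtain ⟨fuel, rfl⟩ : ∃ fuel', fuel = fuel' + 1 := ⟨fuel - 1, by omega⟩
      set f := pvPf p with hf
      have hpi : pvPf p i < p.length := pvPf_lt hwf hi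
      set g2 := pvPf p (pvPf p i) with hg2
      have hg2lt : g2 < p.length := pvPf_lt hwf hpi
      have hg2iter : (pvPf p)^[2] i = g2 := by
        rw [show (2 : Nat) = 1 + 1 from rfl, Function.iterate_add_apply]
        simp [hg2]
      have hstep : pvFindA p ((i : Nat) : Int) (fuel + 1)
          = pvFindA (p.set i ((g2 : Nat) : Int)) ((g2 : Nat) : Int) fuel := by
        rw [pvFindA, PySem.List.pyGet?_natCast, List.getElem?_eq_getElem hi]
        simp only [Option.some.injEq]
        rw [pvGetElem_eq_pf hwf hi]
        rw [if_neg (by exact_mod_cast fun h => hroot (by exact_mod_cast h))]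
        rw [PySem.List.pyGet?_natCast, List.getElem?_eq_getElem hpi]
        simp only [Option.some.injEq]
        rw [pvGetElem_eq_pf hwf hpi, ← hg2, PySem.List.pySetD_natCast]
      -- avoidance : the path of g2 never passes through i
      have havoid : ∀ j, j ≤ d - 2 → (pvPf p)^[j] g2 ≠ i := by
        intro j hj hcontra
        have hc : (pvPf p)^[j + 2] i = i := by
          rw [Function.iterate_add_apply, hg2iter, hcontra]
        exact hroot (pvCyc hc (by omega) hd)
      have he : pvPf p ((pvPf p)^[d - 2] g2) = (pvPf p)^[d - 2] g2 := by
        have h1 : (pvPf p)^[d - 2] g2 = (pvPf p)^[max d 2] i := by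
          rw [← hg2iter, ← Function.iterate_add_apply]
          congr 1; omega
        have h2 : (pvPf p)^[max d 2] i = (pvPf p)^[d] i := pvStab hd (le_max_left _ _)
        rw [h1, h2]; exact hd
      have hcase : pvPf p i = i ∨ pvRoot p g2 = pvRoot p i := by
        right
        rw [hg2, pvRoot_step hwf hpi, pvRoot_step hwf hi]
      have hwf' : pvWF (p.set i ((g2 : Nat) : Int)) := pvWF_set hwf hi hg2lt he havoid
      have hlen' : (p.set i ((g2 : Nat) : Int)).length = p.length := List.length_set ..
      have hpres : ∀ j, j < p.length → pvRoot (p.set i ((g2 : Nat) : Int)) j = pvRoot p j := by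
        intro j hj
        rw [pvRoot_set hwf hi hg2lt he havoid hcase j hj]
        by_cases hc : pvRoot p j = pvRoot p i
        · rw [if_pos hc, hcase.resolve_left hroot, hc]
        · rw [if_neg hc]
      -- witness for g2 in the compressed parent
      have he' : pvPf (p.set i ((g2 : Nat) : Int)) ((pvPf (p.set i ((g2 : Nat) : Int)))^[d - 2] g2)
          = (pvPf (p.set i ((g2 : Nat) : Int)))^[d - 2] g2 := by
        rw [pvIter_set_eq hi havoid (d - 2) le_rfl]
        have h3 := pvPf_set hi g2 ((pvPf p)^[d - 2] g2)
        rw [if_neg (havoid (d - 2) le_rfl)] at h3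
        rw [h3]
        exact he
      have hIH := ih (d - 2) (by omega) (p.set i ((g2 : Nat) : Int)) g2 fuel hwf'
        (by omega) he' (by omega)
      rw [hstep]
      refine ⟨?_, hIH.2.1, ?_, ?_⟩
      · rw [hIH.1, hpres g2 hg2lt, hg2, pvRoot_step hwf hpi, pvRoot_step hwf hi]
      · rw [hIH.2.2.1, hlen']
      · intro j hj
        rw [hIH.2.2.2 j (by omega), hpres j hj]

lemma pvUnionA_spec (p : List Int) (l r : Nat) (hwf : pvWF p)
    (hl : l < p.length) (hr : r < p.length) :
    pvWF (pvUnionA p ((l : Nat) : Int) ((r : Nat) : Int)) ∧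
    (pvUnionA p ((l : Nat) : Int) ((r : Nat) : Int)).length = p.length ∧
    ∀ j, j < p.length → pvRoot (pvUnionA p ((l : Nat) : Int) ((r : Nat) : Int)) j =
      if pvRoot p j = pvRoot p l then pvRoot p r else pvRoot p j := by
  obtain ⟨d1, hd1lt, hd1⟩ := pvExists_root_lt hwf hl
  have hF1 := pvFindA_spec d1 p l p.length hwf hl hd1 (by omega)
  set p1 := (pvFindA p ((l : Nat) : Int) p.length).1 with hp1
  obtain ⟨hF1v, hwf1, hlen1, hpres1⟩ := hF1
  obtain ⟨d2, hd2lt, hd2⟩ := pvExists_root_lt hwf1 (show r < p1.length by omega)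
  have hF2 := pvFindA_spec d2 p1 r p1.length hwf1 (by omega) hd2 (by omega)
  set p2 := (pvFindA p1 ((r : Nat) : Int) p1.length).1 with hp2
  obtain ⟨hF2v, hwf2, hlen2, hpres2⟩ := hF2
  have hpres12 : ∀ j, j < p.length → pvRoot p2 j = pvRoot p j := by
    intro j hj
    rw [hpres2 j (by omega), hpres1 j hj]
  have hrl : pvRoot p1 r = pvRoot p r := hpres1 r hr
  have hUnfold : pvUnionA p ((l : Nat) : Int) ((r : Nat) : Int)
      = if ((pvRoot p l : Nat) : Int) ≠ ((pvRoot p r : Nat) : Int)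
        then PySem.List.pySetD p2 ((pvRoot p l : Nat) : Int) ((pvRoot p r : Nat) : Int)
        else p2 := by
    rw [pvUnionA]
    simp only [← hp1, ← hp2, hF1v, hF2v, hrl]
  by_cases hne : pvRoot p l = pvRoot p r
  · rw [hUnfold, if_neg (by simp [hne])]
    refine ⟨hwf2, by omega, ?_⟩
    intro j hj
    rw [hpres12 j hj]
    by_cases hc : pvRoot p j = pvRoot p l
    · rw [if_pos hc, hc, hne]
    · rw [if_neg hc]
  · rw [hUnfold, if_pos (by simpa using fun h => hne (by exact_mod_cast h))]
    rw [PySem.List.pySetD_natCast]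
    have hxlt : pvRoot p l < p2.length := by have := pvRoot_lt hwf hl; omega
    have hylt : pvRoot p r < p2.length := by have := pvRoot_lt hwf hr; omega
    have hxroot : pvPf p2 (pvRoot p l) = pvRoot p l := by
      have h1 : pvRoot p2 l = pvRoot p l := hpres12 l hl
      have := pvRoot_isRoot hwf2 (show l < p2.length by omega)
      rwa [h1] at this
    have hyroot : pvPf p2 (pvRoot p r) = pvRoot p r := by
      have h1 : pvRoot p2 r = pvRoot p r := hpres12 r hr
      have := pvRoot_isRoot hwf2 (show r < p2.length by omega)
      rwa [h1] at this
    have he : pvPf p2 ((pvPf p2)^[0] (pvRoot p r)) = (pvPf p2)^[0] (pvRoot p r) := by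
      simpa using hyroot
    have havoid : ∀ j, j ≤ 0 → (pvPf p2)^[j] (pvRoot p r) ≠ pvRoot p l := by
      intro j hj
      rw [Nat.le_zero.mp hj]
      simpa using fun h => hne h.symm
    have hRx : pvRoot p2 (pvRoot p l) = pvRoot p l :=
      pvRoot_of_isRoot hwf2 hxlt hxroot
    have hRy : pvRoot p2 (pvRoot p r) = pvRoot p r :=
      pvRoot_of_isRoot hwf2 hylt hyroot
    have hmap := pvRoot_set hwf2 hxlt hylt he havoid (Or.inl hxroot)
    refine ⟨pvWF_set hwf2 hxlt hylt he havoid, ?_, ?_⟩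
    · rw [List.length_set]; omega
    · intro j hj
      rw [hmap j (by omega), hRx, hRy, hpres12 j hj]

-- ===== the overlap relation and A's main loop =====

lemma pvInter_ne_nil_iff (s t : List String) :
    PySem.Set.inter s t ≠ [] ↔ ∃ f, f ∈ s ∧ f ∈ t := by
  rw [Ne, List.eq_nil_iff_forall_not_mem]
  constructor
  · intro h
    by_contra hno
    push_neg at hno
    exact h (fun x hx => hno x ((PySem.Set.mem_inter s t x).mp hx).1
      ((PySem.Set.mem_inter s t x).mp hx).2)
  · rintro ⟨f, hf1, hf2⟩ h
    exact h f ((PySem.Set.mem_inter s t f).mpr ⟨hf1, hf2⟩)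

def pvOv (af : List ((List (String × String)) × List String)) (i j : Nat) : Prop :=
  i < af.length ∧ j < af.length ∧
    ∃ f, f ∈ (af.getD i ([], [])).2 ∧ f ∈ (af.getD j ([], [])).2

lemma pvOv_symm {af : List ((List (String × String)) × List String)} {i j : Nat}
    (h : pvOv af i j) : pvOv af j i := ⟨h.2.1, h.1, h.2.2.imp (fun _ hf => ⟨hf.2, hf.1⟩)⟩

def pvStepA (af : List ((List (String × String)) × List String))
    (par : List Int) (pr : Int × Int) : List Int :=
  if PySem.Set.inter (PySem.List.pyGetD af pr.1 ([], [])).2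
      (PySem.List.pyGetD af pr.2 ([], [])).2 ≠ [] then
    pvUnionA par pr.1 pr.2
  else par

lemma pvALoop (af : List ((List (String × String)) × List String)) :
    ∀ (pairs : List (Int × Int)) (p0 : List Int), pvWF p0 → p0.length = af.length →
    (∀ pr ∈ pairs, ∃ lN rN : Nat, pr = (((lN : Nat) : Int), ((rN : Nat) : Int))
        ∧ lN < af.length ∧ rN < af.length) →
    pvWF (pairs.foldl (pvStepA af) p0) ∧
    (pairs.foldl (pvStepA af) p0).length = af.length ∧
    (∀ i j, i < af.length → j < af.length → pvRoot p0 i = pvRoot p0 j →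
      pvRoot (pairs.foldl (pvStepA af) p0) i = pvRoot (pairs.foldl (pvStepA af) p0) j) ∧
    (∀ lN rN : Nat, (((lN : Nat) : Int), ((rN : Nat) : Int)) ∈ pairs → pvOv af lN rN →
      pvRoot (pairs.foldl (pvStepA af) p0) lN = pvRoot (pairs.foldl (pvStepA af) p0) rN) ∧
    (∀ E : Nat → Nat → Prop, Equivalence E → (∀ i j, pvOv af i j → E i j) →
      (∀ i j, i < af.length → j < af.length → pvRoot p0 i = pvRoot p0 j → E i j) →
      ∀ i j, i < af.length → j < af.length →
        pvRoot (pairs.foldl (pvStepA af) p0) i = pvRoot (pairs.foldl (pvStepA af) p0) j → E i j) := by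
  intro pairs
  induction pairs with
  | nil =>
    intro p0 hwf hlen hmem
    refine ⟨hwf, hlen, fun i j _ _ h => h, by simp, ?_⟩
    intro E _ _ h0 i j hi hj hij
    exact h0 i j hi hj hij
  | cons pr rest ih =>
    intro p0 hwf hlen hmem
    obtain ⟨lN, rN, hpr, hlN, hrN⟩ := hmem pr (by simp)
    subst hpr
    simp only [List.foldl_cons]
    by_cases htest : PySem.Set.inter (PySem.List.pyGetD af ((lN : Nat) : Int) ([], [])).2
        (PySem.List.pyGetD af ((rN : Nat) : Int) ([], [])).2 ≠ []
    · have hp1 : pvStepA af p0 (((lN : Nat) : Int), ((rN : Nat) : Int))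
          = pvUnionA p0 ((lN : Nat) : Int) ((rN : Nat) : Int) := by
        rw [pvStepA, if_pos htest]
      have hOvHead : pvOv af lN rN := by
        rw [PySem.List.pyGetD_natCast, PySem.List.pyGetD_natCast] at htest
        exact ⟨hlN, hrN, (pvInter_ne_nil_iff _ _).mp htest⟩
      obtain ⟨hwf1, hlen1, hmap⟩ := pvUnionA_spec p0 lN rN hwf (by omega) (by omega)
      rw [hp1]
      set p1 := pvUnionA p0 ((lN : Nat) : Int) ((rN : Nat) : Int) with hp1d
      have hmono01 : ∀ i j, i < af.length → j < af.length →
          pvRoot p0 i = pvRoot p0 j → pvRoot p1 i = pvRoot p1 j := by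
        intro i j hi hj hij
        rw [hmap i (by omega), hmap j (by omega), hij]
      have hhead : pvRoot p1 lN = pvRoot p1 rN := by
        rw [hmap lN (by omega), hmap rN (by omega), if_pos rfl]
        by_cases hc : pvRoot p0 rN = pvRoot p0 lN
        · rw [if_pos hc]
        · rw [if_neg hc]
      obtain ⟨hwfF, hlenF, hmonoF, hpairF, hsoundF⟩ :=
        ih p1 hwf1 (by omega) (fun pr hpr => hmem pr (by simp [hpr]))
      refine ⟨hwfF, hlenF, ?_, ?_, ?_⟩
      · intro i j hi hj hij
        exact hmonoF i j hi hj (hmono01 i j hi hj hij)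
      · intro aN bN hab hOvab
        rcases List.mem_cons.mp hab with h | h
        · simp only [Prod.mk.injEq, Int.natCast_inj] at h
          obtain ⟨rfl, rfl⟩ := h
          exact hmonoF aN bN (by omega) (by omega) hhead
        · exact hpairF aN bN h hOvab
      · intro E hE hOv h0 i j hi hj hij
        refine hsoundF E hE hOv ?_ i j hi hj hij
        intro a b ha hb hab
        -- root p1 a = root p1 b → E a b
        rw [hmap a (by omega), hmap b (by omega)] at hab
        have hElr : E lN rN := hOv lN rN hOvHead
        by_cases hca : pvRoot p0 a = pvRoot p0 lN <;> by_cases hcb : pvRoot p0 b = pvRoot p0 lN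
        · exact hE.trans (h0 a lN ha hlN hca) (hE.symm (h0 b lN hb hlN hcb))
        · rw [if_pos hca, if_neg hcb] at hab
          exact hE.trans (h0 a lN ha hlN hca)
            (hE.trans hElr (hE.symm (h0 b rN hb hrN hab.symm)))
        · rw [if_neg hca, if_pos hcb] at hab
          exact hE.trans (h0 a rN ha hrN hab)
            (hE.trans (hE.symm hElr) (hE.symm (h0 b lN hb hlN hcb)))
        · rw [if_neg hca, if_neg hcb] at hab
          exact h0 a b ha hb hab
    · have hp1 : pvStepA af p0 (((lN : Nat) : Int), ((rN : Nat) : Int)) = p0 := by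
        rw [pvStepA, if_neg htest]
      rw [hp1]
      obtain ⟨hwfF, hlenF, hmonoF, hpairF, hsoundF⟩ :=
        ih p0 hwf hlen (fun pr hpr => hmem pr (by simp [hpr]))
      refine ⟨hwfF, hlenF, hmonoF, ?_, hsoundF⟩
      intro aN bN hab hOvab
      rcases List.mem_cons.mp hab with h | h
      · simp only [Prod.mk.injEq, Int.natCast_inj] at h
        obtain ⟨rfl, rfl⟩ := h
        exfalso
        apply htest
        rw [PySem.List.pyGetD_natCast, PySem.List.pyGetD_natCast]
        exact (pvInter_ne_nil_iff _ _).mpr hOvab.2.2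
      · exact hpairF aN bN h hOvab

-- ===== initial parent, the pair list, and A's grouping loop =====

lemma pvInit (n : Nat) :
    pvWF (PySem.List.pyRange 0 (n : Int) 1) ∧
    (PySem.List.pyRange 0 (n : Int) 1).length = n ∧
    (∀ i, i < n → pvRoot (PySem.List.pyRange 0 (n : Int) 1) i = i) := by
  have hlen : (PySem.List.pyRange 0 (n : Int) 1).length = n := by
    rw [PySem.List.length_pyRange_one]; simp
  have hget : ∀ i, i < n → (PySem.List.pyRange 0 (n : Int) 1).getD i 0 = (i : Int) := by
    intro i hi
    rw [List.getD_eq_getElem?_getD, List.getElem?_eq_getElem (by omega),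
        PySem.List.getElem_pyRange_one]
    simp
  have hpf : ∀ i, i < n → pvPf (PySem.List.pyRange 0 (n : Int) 1) i = i := by
    intro i hi; unfold pvPf; rw [hget i hi]; simp
  have hwf : pvWF (PySem.List.pyRange 0 (n : Int) 1) := by
    constructor
    · intro i hi
      rw [hlen] at hi
      rw [hget i hi]
      constructor
      · simp
      · unfold pvPf; rw [hget i hi]; simpa using hi
    · intro i hi
      rw [hlen] at hi
      exact ⟨0, by simpa using hpf i hi⟩
  exact ⟨hwf, hlen, fun i hi => pvRoot_of_isRoot hwf (by omega) (hpf i hi)⟩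

def pvPairs (n : Int) : List (Int × Int) :=
  (PySem.List.pyRange 0 n 1).flatMap
    (fun l => (PySem.List.pyRange (l + 1) n 1).map (fun r => (l, r)))

lemma pvPairs_shape {n : Nat} : ∀ pr ∈ pvPairs (n : Int),
    ∃ lN rN : Nat, pr = (((lN : Nat) : Int), ((rN : Nat) : Int)) ∧ lN < rN ∧ rN < n := by
  intro pr hpr
  rw [pvPairs, List.mem_flatMap] at hpr
  obtain ⟨l, hl, hpr⟩ := hpr
  rw [List.mem_map] at hpr
  obtain ⟨r, hr, rfl⟩ := hpr
  rw [PySem.List.mem_pyRange_one] at hl hr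
  refine ⟨l.toNat, r.toNat, ?_, by omega, by omega⟩
  simp only [Prod.mk.injEq]
  constructor <;> omega
lemma pvPairs_mem {n lN rN : Nat} (h1 : lN < rN) (h2 : rN < n) :
    (((lN : Nat) : Int), ((rN : Nat) : Int)) ∈ pvPairs (n : Int) := by
  rw [pvPairs, List.mem_flatMap]
  refine ⟨(lN : Int), ?_, ?_⟩
  · rw [PySem.List.mem_pyRange_one]; omega
  · rw [List.mem_map]
    refine ⟨(rN : Int), ?_, rfl⟩
    rw [PySem.List.mem_pyRange_one]; omega

lemma pvAChar (af : List ((List (String × String)) × List String)) :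
    pvWF ((pvPairs (af.length : Int)).foldl (pvStepA af) (PySem.List.pyRange 0 (af.length : Int) 1)) ∧
    ((pvPairs (af.length : Int)).foldl (pvStepA af) (PySem.List.pyRange 0 (af.length : Int) 1)).length = af.length ∧
    ∀ i j, i < af.length → j < af.length →
      (pvRoot ((pvPairs (af.length : Int)).foldl (pvStepA af) (PySem.List.pyRange 0 (af.length : Int) 1)) i
        = pvRoot ((pvPairs (af.length : Int)).foldl (pvStepA af) (PySem.List.pyRange 0 (af.length : Int) 1)) j
      ↔ Relation.EqvGen (pvOv af) i j) := by
  obtain ⟨hwf0, hlen0, hroot0⟩ := pvInit af.length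
  obtain ⟨hwfF, hlenF, hmonoF, hpairF, hsoundF⟩ :=
    pvALoop af (pvPairs (af.length : Int)) (PySem.List.pyRange 0 (af.length : Int) 1) hwf0 hlen0
      (by
        intro pr hpr
        obtain ⟨lN, rN, rfl, h1, h2⟩ := pvPairs_shape pr hpr
        exact ⟨lN, rN, rfl, by omega, h2⟩)
  refine ⟨hwfF, hlenF, ?_⟩
  intro i j hi hj
  constructor
  · intro hij
    refine hsoundF (Relation.EqvGen (pvOv af)) (Relation.EqvGen.is_equivalence _) ?_ ?_ i j hi hj hij
    · intro a b hab; exact Relation.EqvGen.rel a b hab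
    · intro a b ha hb hab
      rw [hroot0 a ha, hroot0 b hb] at hab
      subst hab
      exact (Relation.EqvGen.is_equivalence _).refl a
  · intro h
    clear hi hj
    induction h with
    | rel a b hab =>
      rcases Nat.lt_trichotomy a b with h | h | h
      · exact hpairF a b (pvPairs_mem h hab.2.1) hab
      · subst h; rfl
      · exact (hpairF b a (pvPairs_mem h hab.1) (pvOv_symm hab)).symm
    | refl a => rfl
    | symm a b _ ihab => exact ihab.symm
    | trans a b c _ _ ih1 ih2 => exact ih1.trans ih2

lemma pvAGroup : ∀ (is : List Int) (par : List Int) (d : PySem.Dict Int (List Int)),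
    pvWF par → (∀ idx ∈ is, ∃ iN : Nat, idx = ((iN : Nat) : Int) ∧ iN < par.length) →
    (is.foldl (fun (st : List Int × PySem.Dict Int (List Int)) index =>
        (((pvFindA st.1 index st.1.length)).1,
          st.2.modify ((pvFindA st.1 index st.1.length)).2 [] (fun l => l ++ [index]))) (par, d)).2
      = is.foldl (fun dd idx =>
          dd.modify ((pvRoot par idx.toNat : Nat) : Int) [] (fun l => l ++ [idx])) d := by
  intro is
  induction is with
  | nil => intro par d _ _; rfl
  | cons idx rest ih =>
    intro par d hwf hmem
    obtain ⟨iN, hidxeq, hiN⟩ := hmem idx (List.mem_cons_self ..)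
    subst hidxeq
    obtain ⟨dep, hdeplt, hdep⟩ := pvExists_root_lt hwf hiN
    obtain ⟨hFv, hwf', hlen', hpres⟩ := pvFindA_spec dep par iN par.length hwf hiN hdep (by omega)
    simp only [List.foldl_cons, hFv]
    rw [ih (pvFindA par ((iN : Nat) : Int) par.length).1 _ hwf'
      (by
        intro idx2 hidx
        obtain ⟨jN, hj, hjN⟩ := hmem idx2 (List.mem_cons_of_mem _ hidx)
        exact ⟨jN, hj, by omega⟩)]
    rw [Int.toNat_natCast]
    apply PySem.List.foldl_congr_mem
    intro acc x hx
    obtain ⟨jN, rfl, hjN⟩ := hmem x (List.mem_cons_of_mem _ hx)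
    rw [Int.toNat_natCast, hpres jN (by omega)]

-- ===== grouping dictionaries: characterization and partition invariance =====

def pvGrp (key : Int → Int) (is : List Int) : PySem.Dict Int (List Int) :=
  is.foldl (fun d i => d.modify (key i) [] (fun g => g ++ [i])) (PySem.Dict.mk [])

lemma pvFind?_self_of_mem {D : List Int} {k : Int} (h : k ∈ D) :
    D.find? (fun c => c == k) = some k := by
  induction D with
  | nil => simp at h
  | cons c D ih =>
    simp only [List.find?]
    by_cases hck : (c == k) = true
    · rw [hck]
      simp only [cond_true, Option.some.injEq]
      exact eq_of_beq hck
    · rw [Bool.not_eq_true] at hck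
      rw [hck]
      simp only [cond_false]
      apply ih
      rcases List.mem_cons.mp h with h1 | h1
      · subst h1; simp at hck
      · exact h1

lemma pvDedup_append (l : List Int) (a : Int) :
    PySem.List.dedup (l ++ [a])
      = if a ∈ l then PySem.List.dedup l else PySem.List.dedup l ++ [a] := by
  rw [PySem.List.dedup_eq_ofList, PySem.List.dedup_eq_ofList,
      PySem.Set.ofList_eq_foldl, PySem.Set.ofList_eq_foldl, List.foldl_append]
  simp only [List.foldl_cons, List.foldl_nil]
  rw [← PySem.Set.ofList_eq_foldl]
  by_cases h : a ∈ l
  · rw [if_pos h, PySem.Set.add, if_pos]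
    simp only [PySem.Set.contains, List.contains_eq_mem, decide_eq_true_eq]
    exact (PySem.Set.mem_ofList l a).mpr h
  · rw [if_neg h, PySem.Set.add, if_neg]
    simp only [PySem.Set.contains, List.contains_eq_mem, decide_eq_true_eq]
    intro hc
    exact h ((PySem.Set.mem_ofList l a).mp hc)

lemma pvGrp_items (key : Int → Int) (is : List Int) :
    (pvGrp key is).items
      = (PySem.List.dedup (is.map key)).map
          (fun c => (c, is.filter (fun i => key i == c))) := by
  induction is using List.reverseRecOn with
  | nil => rfl
  | append_singleton is x ih =>
    rw [pvGrp, List.foldl_append]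
    simp only [List.foldl_cons, List.foldl_nil]
    rw [← pvGrp, List.map_append, List.map_cons, List.map_nil, pvDedup_append]
    by_cases hmem : key x ∈ is.map key
    · rw [if_pos hmem]
      have hkdedup : key x ∈ PySem.List.dedup (is.map key) := by
        rw [PySem.List.dedup_eq_ofList]
        exact (PySem.Set.mem_ofList _ _).mpr hmem
      have hcont : (pvGrp key is).contains (key x) = true := by
        rw [PySem.Dict.contains, ih, List.any_map, List.any_eq_true]
        exact ⟨key x, hkdedup, by simp⟩
      have hget : (pvGrp key is).getD (key x) [] = is.filter (fun i => key i == key x) := by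
        rw [PySem.Dict.getD, PySem.Dict.get?, ih, List.find?_map]
        have hcomp : ((fun (p : Int × List Int) => p.1 == key x) ∘
            (fun c => (c, is.filter (fun i => key i == c)))) = fun c => c == key x := rfl
        rw [hcomp, pvFind?_self_of_mem hkdedup]
        rfl
      rw [PySem.Dict.modify, PySem.Dict.insert, if_pos hcont, hget, ih]
      dsimp only
      rw [List.map_map]
      apply List.map_congr_left
      intro c hc
      simp only [Function.comp_apply]
      by_cases hck : c = key x
      · subst hck
        rw [if_pos (by simp), List.filter_append]
        simp
      · rw [if_neg (by simp [hck])]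
        have hxc : List.filter (fun i => key i == c) [x] = [] := by
          simp only [List.filter_cons, List.filter_nil]
          rw [if_neg (by simpa using fun hcon => hck hcon.symm)]
        rw [List.filter_append, hxc, List.append_nil]
    · rw [if_neg hmem]
      have hcont : (pvGrp key is).contains (key x) = false := by
        rw [PySem.Dict.contains, ih, List.any_map, List.any_eq_false]
        intro c hc
        have hne : ¬ (c = key x) := by
          intro hce
          subst hce
          rw [PySem.List.dedup_eq_ofList] at hc
          exact hmem ((PySem.Set.mem_ofList _ _).mp hc)
        simp [hne]
      have hget : (pvGrp key is).getD (key x) [] = [] := by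
        rw [PySem.Dict.getD, PySem.Dict.get?]
        have : (pvGrp key is).items.find? (fun p => p.1 == key x) = none := by
          rw [List.find?_eq_none]
          intro p hp
          have := hcont
          rw [PySem.Dict.contains, List.any_eq_false] at this
          exact this p hp
        rw [this]
        rfl
      rw [PySem.Dict.modify, PySem.Dict.insert, if_neg (by simp [hcont]), hget, ih]
      dsimp only
      rw [List.map_append, List.map_cons, List.map_nil]
      congr 1
      · apply List.map_congr_left
        intro c hc
        have hck : c ≠ key x := by
          intro hck
          subst hck
          rw [PySem.List.dedup_eq_ofList] at hc
          exact hmem ((PySem.Set.mem_ofList _ _).mp hc)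
        have hxc : List.filter (fun i => key i == c) [x] = [] := by
          simp only [List.filter_cons, List.filter_nil]
          rw [if_neg (by simpa using fun hcon => hck hcon.symm)]
        rw [List.filter_append, hxc, List.append_nil]
      · have h1 : List.filter (fun i => key i == key x) is = [] := by
          rw [List.filter_eq_nil_iff]
          intro i hi
          simp only [beq_iff_eq]
          intro hcon
          exact hmem (List.mem_map.mpr ⟨i, hi, hcon⟩)
        rw [List.filter_append, h1, List.nil_append]
        simp

lemma pvReps (ka kb : Int → Int) : ∀ (is : List Int),
    (∀ a b, a ∈ is → b ∈ is → (ka a = ka b ↔ kb a = kb b)) →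
    ∃ reps : List Int, (∀ r ∈ reps, r ∈ is) ∧
      PySem.List.dedup (is.map ka) = reps.map ka ∧
      PySem.List.dedup (is.map kb) = reps.map kb := by
  intro is
  induction is using List.reverseRecOn with
  | nil => intro _; exact ⟨[], by simp, rfl, rfl⟩
  | append_singleton is x ih =>
    intro h
    obtain ⟨reps, hsub, hka, hkb⟩ := ih (fun a b ha hb =>
      h a b (List.mem_append_left _ ha) (List.mem_append_left _ hb))
    have hx : x ∈ is ++ [x] := List.mem_append_right _ (by simp)
    have hbridge : ka x ∈ is.map ka ↔ kb x ∈ is.map kb := by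
      constructor
      · intro hm
        obtain ⟨a, ha, haeq⟩ := List.mem_map.mp hm
        exact List.mem_map.mpr ⟨a, ha,
          (h a x (List.mem_append_left _ ha) hx).mp haeq⟩
      · intro hm
        obtain ⟨a, ha, haeq⟩ := List.mem_map.mp hm
        exact List.mem_map.mpr ⟨a, ha,
          (h a x (List.mem_append_left _ ha) hx).mpr haeq⟩
    rw [List.map_append, List.map_cons, List.map_nil, pvDedup_append,
        List.map_append, List.map_cons, List.map_nil, pvDedup_append]
    by_cases hin : ka x ∈ is.map ka
    · rw [if_pos hin, if_pos (hbridge.mp hin)]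
      exact ⟨reps, fun r hr => List.mem_append_left _ (hsub r hr), hka, hkb⟩
    · rw [if_neg hin, if_neg (fun hc => hin (hbridge.mpr hc))]
      refine ⟨reps ++ [x], ?_, ?_, ?_⟩
      · intro r hr
        rcases List.mem_append.mp hr with h1 | h1
        · exact List.mem_append_left _ (hsub r h1)
        · simp only [List.mem_singleton] at h1
          subst h1; exact hx
      · rw [List.map_append, List.map_cons, List.map_nil, hka]
      · rw [List.map_append, List.map_cons, List.map_nil, hkb]

lemma pvGrp_values_eq (ka kb : Int → Int) (is : List Int)
    (h : ∀ a b, a ∈ is → b ∈ is → (ka a = ka b ↔ kb a = kb b)) :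
    (pvGrp ka is).values = (pvGrp kb is).values := by
  obtain ⟨reps, hsub, hkaD, hkbD⟩ := pvReps ka kb is h
  rw [PySem.Dict.values, PySem.Dict.values, pvGrp_items, pvGrp_items, hkaD, hkbD,
      List.map_map, List.map_map, List.map_map, List.map_map]
  apply List.map_congr_left
  intro r hr
  simp only [Function.comp_apply]
  apply List.filter_congr
  intro i hi
  have hiff := h i r hi (hsub r hr)
  by_cases hcase : ka i = ka r
  · have h2 := hiff.mp hcase
    simp [hcase, h2]
  · have h2 : ¬ kb i = kb r := fun hc => hcase (hiff.mpr hc)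
    simp [hcase, h2]

-- ===== B side: min-label merging =====

def pvKeyB (lab : List Int) (i : Nat) : Int := lab.getD i 0

lemma pvMerge_len (lab : List Int) (a b : Int) :
    (pvMergeLabels lab a b).length = lab.length := by
  rw [pvMergeLabels]
  split <;> simp

lemma pvMerge_keyB {lab : List Int} {iN jN : Nat} (hi : iN < lab.length)
    (hj : jN < lab.length) {z : Nat} (hz : z < lab.length) :
    pvKeyB (pvMergeLabels lab (pvKeyB lab iN) (pvKeyB lab jN)) z
      = if pvKeyB lab z = max (pvKeyB lab iN) (pvKeyB lab jN)
        then min (pvKeyB lab iN) (pvKeyB lab jN) else pvKeyB lab z := by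
  set li := pvKeyB lab iN with hli
  set lj := pvKeyB lab jN with hlj
  by_cases hne : li ≠ lj
  · have hlo : (if li < lj then li else lj) = min li lj := by
      by_cases h : li < lj <;> simp [h, min_def] <;> omega
    have hhi : (if li < lj then lj else li) = max li lj := by
      by_cases h : li < lj <;> simp [h, max_def] <;> omega
    rw [pvMergeLabels, if_pos hne]
    simp only [hlo, hhi]
    unfold pvKeyB
    rw [List.getD_eq_getElem?_getD, List.getElem?_eq_getElem (by simpa using hz),
        List.getElem_map, List.getD_eq_getElem?_getD, List.getElem?_eq_getElem hz]
    rfl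
  · push_neg at hne
    rw [pvMergeLabels, if_neg (by simpa using hne)]
    rw [← hne]
    simp only [max_self, min_self]
    by_cases h : pvKeyB lab z = li
    · rw [if_pos h, h]
    · rw [if_neg h]

lemma pvMerge_eq_iff {lab : List Int} {iN jN : Nat} (hi : iN < lab.length)
    (hj : jN < lab.length) {z w : Nat} (hz : z < lab.length) (hw : w < lab.length) :
    pvKeyB (pvMergeLabels lab (pvKeyB lab iN) (pvKeyB lab jN)) z
      = pvKeyB (pvMergeLabels lab (pvKeyB lab iN) (pvKeyB lab jN)) w
    ↔ (pvKeyB lab z = pvKeyB lab w ∨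
       (pvKeyB lab z = pvKeyB lab iN ∧ pvKeyB lab w = pvKeyB lab jN) ∨
       (pvKeyB lab z = pvKeyB lab jN ∧ pvKeyB lab w = pvKeyB lab iN)) := by
  rw [pvMerge_keyB hi hj hz, pvMerge_keyB hi hj hw]
  omega

lemma pvMerge_relates {lab : List Int} {iN jN : Nat} (hi : iN < lab.length)
    (hj : jN < lab.length) :
    pvKeyB (pvMergeLabels lab (pvKeyB lab iN) (pvKeyB lab jN)) iN
      = pvKeyB (pvMergeLabels lab (pvKeyB lab iN) (pvKeyB lab jN)) jN := by
  rw [pvMerge_keyB hi hj hi, pvMerge_keyB hi hj hj]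
  omega

lemma pvMerge_mono {lab : List Int} {iN jN : Nat} (hi : iN < lab.length)
    (hj : jN < lab.length) {z w : Nat} (hz : z < lab.length) (hw : w < lab.length)
    (h : pvKeyB lab z = pvKeyB lab w) :
    pvKeyB (pvMergeLabels lab (pvKeyB lab iN) (pvKeyB lab jN)) z
      = pvKeyB (pvMergeLabels lab (pvKeyB lab iN) (pvKeyB lab jN)) w := by
  rw [pvMerge_keyB hi hj hz, pvMerge_keyB hi hj hw, h]

lemma pvBInner (af : List ((List (String × String)) × List String)) (iN : Nat)
    (hiN : iN < af.length) :
    ∀ (fs : List String) (lab : List Int) (owner : PySem.Dict String Int),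
    lab.length = af.length →
    (∀ f ∈ fs, f ∈ (af.getD iN ([], [])).2) →
    (∀ f v, owner.get? f = some v →
      ∃ jN : Nat, v = ((jN : Nat) : Int) ∧ jN < af.length ∧ f ∈ (af.getD jN ([], [])).2) →
    (∀ z w, z < af.length → w < af.length → pvKeyB lab z = pvKeyB lab w →
      Relation.EqvGen (pvOv af) z w) →
    (fs.foldl (fun (st : List Int × PySem.Dict String Int) f =>
        match st.2.get? f with
        | some j => (pvMergeLabels st.1 (PySem.List.pyGetD st.1 ((iN : Nat) : Int) 0)
            (PySem.List.pyGetD st.1 j 0), st.2)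
        | none => (st.1, st.2.insert f ((iN : Nat) : Int))) (lab, owner)).1.length = af.length ∧
    (∀ f v, owner.get? f = some v →
      (fs.foldl (fun (st : List Int × PySem.Dict String Int) f =>
        match st.2.get? f with
        | some j => (pvMergeLabels st.1 (PySem.List.pyGetD st.1 ((iN : Nat) : Int) 0)
            (PySem.List.pyGetD st.1 j 0), st.2)
        | none => (st.1, st.2.insert f ((iN : Nat) : Int))) (lab, owner)).2.get? f = some v) ∧
    (∀ f v, (fs.foldl (fun (st : List Int × PySem.Dict String Int) f =>
        match st.2.get? f with
        | some j => (pvMergeLabels st.1 (PySem.List.pyGetD st.1 ((iN : Nat) : Int) 0)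
            (PySem.List.pyGetD st.1 j 0), st.2)
        | none => (st.1, st.2.insert f ((iN : Nat) : Int))) (lab, owner)).2.get? f = some v →
      ∃ jN : Nat, v = ((jN : Nat) : Int) ∧ jN < af.length ∧ f ∈ (af.getD jN ([], [])).2) ∧
    (∀ z w, z < af.length → w < af.length → pvKeyB lab z = pvKeyB lab w →
      pvKeyB (fs.foldl (fun (st : List Int × PySem.Dict String Int) f =>
        match st.2.get? f with
        | some j => (pvMergeLabels st.1 (PySem.List.pyGetD st.1 ((iN : Nat) : Int) 0)
            (PySem.List.pyGetD st.1 j 0), st.2)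
        | none => (st.1, st.2.insert f ((iN : Nat) : Int))) (lab, owner)).1 z
      = pvKeyB (fs.foldl (fun (st : List Int × PySem.Dict String Int) f =>
        match st.2.get? f with
        | some j => (pvMergeLabels st.1 (PySem.List.pyGetD st.1 ((iN : Nat) : Int) 0)
            (PySem.List.pyGetD st.1 j 0), st.2)
        | none => (st.1, st.2.insert f ((iN : Nat) : Int))) (lab, owner)).1 w) ∧
    (∀ z w, z < af.length → w < af.length →
      pvKeyB (fs.foldl (fun (st : List Int × PySem.Dict String Int) f =>
        match st.2.get? f with
        | some j => (pvMergeLabels st.1 (PySem.List.pyGetD st.1 ((iN : Nat) : Int) 0)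
            (PySem.List.pyGetD st.1 j 0), st.2)
        | none => (st.1, st.2.insert f ((iN : Nat) : Int))) (lab, owner)).1 z
      = pvKeyB (fs.foldl (fun (st : List Int × PySem.Dict String Int) f =>
        match st.2.get? f with
        | some j => (pvMergeLabels st.1 (PySem.List.pyGetD st.1 ((iN : Nat) : Int) 0)
            (PySem.List.pyGetD st.1 j 0), st.2)
        | none => (st.1, st.2.insert f ((iN : Nat) : Int))) (lab, owner)).1 w →
      Relation.EqvGen (pvOv af) z w) ∧
    (∀ f ∈ fs, ∃ jN : Nat, jN < af.length ∧
      (fs.foldl (fun (st : List Int × PySem.Dict String Int) f =>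
        match st.2.get? f with
        | some j => (pvMergeLabels st.1 (PySem.List.pyGetD st.1 ((iN : Nat) : Int) 0)
            (PySem.List.pyGetD st.1 j 0), st.2)
        | none => (st.1, st.2.insert f ((iN : Nat) : Int))) (lab, owner)).2.get? f
        = some ((jN : Nat) : Int) ∧
      pvKeyB (fs.foldl (fun (st : List Int × PySem.Dict String Int) f =>
        match st.2.get? f with
        | some j => (pvMergeLabels st.1 (PySem.List.pyGetD st.1 ((iN : Nat) : Int) 0)
            (PySem.List.pyGetD st.1 j 0), st.2)
        | none => (st.1, st.2.insert f ((iN : Nat) : Int))) (lab, owner)).1 iN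
      = pvKeyB (fs.foldl (fun (st : List Int × PySem.Dict String Int) f =>
        match st.2.get? f with
        | some j => (pvMergeLabels st.1 (PySem.List.pyGetD st.1 ((iN : Nat) : Int) 0)
            (PySem.List.pyGetD st.1 j 0), st.2)
        | none => (st.1, st.2.insert f ((iN : Nat) : Int))) (lab, owner)).1 jN) := by
  intro fs
  induction fs with
  | nil =>
    intro lab owner hlen _ hOwS hSound
    exact ⟨hlen, fun f v h => h, hOwS, fun z w _ _ h => h, hSound, by simp⟩
  | cons f fs ih =>
    intro lab owner hlen hfs hOwS hSound
    cases howner : owner.get? f with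
    | some v =>
      obtain ⟨jN, rfl, hjN, hfj⟩ := hOwS f v howner
      simp only [List.foldl_cons, howner]
      have hkeyi : PySem.List.pyGetD lab ((iN : Nat) : Int) 0 = pvKeyB lab iN := by
        rw [PySem.List.pyGetD_natCast]; rfl
      have hkeyj : PySem.List.pyGetD lab ((jN : Nat) : Int) 0 = pvKeyB lab jN := by
        rw [PySem.List.pyGetD_natCast]; rfl
      rw [hkeyi, hkeyj]
      set lab1 := pvMergeLabels lab (pvKeyB lab iN) (pvKeyB lab jN) with hlab1
      have hlen1 : lab1.length = af.length := by rw [hlab1, pvMerge_len, hlen]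
      have hOv : Relation.EqvGen (pvOv af) iN jN :=
        Relation.EqvGen.rel _ _ ⟨hiN, hjN, f, hfs f (by simp), hfj⟩
      have hE := Relation.EqvGen.is_equivalence (pvOv af)
      have hSound1 : ∀ z w, z < af.length → w < af.length →
          pvKeyB lab1 z = pvKeyB lab1 w → Relation.EqvGen (pvOv af) z w := by
        intro z w hz hw hzw
        rw [hlab1, pvMerge_eq_iff (by omega) (by omega) (by omega) (by omega)] at hzw
        rcases hzw with h | ⟨h1, h2⟩ | ⟨h1, h2⟩
        · exact hSound z w hz hw h
        · exact hE.trans (hSound z iN hz (by omega) h1)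
            (hE.trans hOv (hE.symm (hSound w jN hw (by omega) h2)))
        · exact hE.trans (hSound z jN hz (by omega) h1)
            (hE.trans (hE.symm hOv) (hE.symm (hSound w iN hw (by omega) h2)))
      have hmono1 : ∀ z w, z < af.length → w < af.length →
          pvKeyB lab z = pvKeyB lab w → pvKeyB lab1 z = pvKeyB lab1 w := by
        intro z w hz hw h
        exact pvMerge_mono (by omega) (by omega) (by omega) (by omega) h
      have hrel1 : pvKeyB lab1 iN = pvKeyB lab1 jN :=
        pvMerge_relates (by omega) (by omega)
      obtain ⟨Rlen, ROwPres, ROwS, Rmono, RSound, RComp⟩ :=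
        ih lab1 owner hlen1 (fun g hg => hfs g (by simp [hg])) hOwS hSound1
      refine ⟨Rlen, fun g v h => ROwPres g v h, ROwS, ?_, RSound, ?_⟩
      · intro z w hz hw h
        exact Rmono z w hz hw (hmono1 z w hz hw h)
      · intro g hg
        rcases List.mem_cons.mp hg with rfl | hg'
        · exact ⟨jN, hjN, ROwPres g _ howner, Rmono iN jN (by omega) (by omega) hrel1⟩
        · exact RComp g hg'
    | none =>
      simp only [List.foldl_cons, howner]
      set owner1 := owner.insert f ((iN : Nat) : Int) with howner1
      have hOwPres1 : ∀ g v, owner.get? g = some v → owner1.get? g = some v := by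
        intro g v h
        by_cases hgf : g = f
        · subst hgf; rw [howner] at h; exact absurd h (by simp)
        · rw [howner1, PySem.Dict.get?_insert_of_ne owner ((iN : Nat) : Int) hgf]; exact h
      have hOwS1 : ∀ g v, owner1.get? g = some v →
          ∃ jN : Nat, v = ((jN : Nat) : Int) ∧ jN < af.length ∧ g ∈ (af.getD jN ([], [])).2 := by
        intro g v h
        by_cases hgf : g = f
        · subst hgf
          rw [howner1, PySem.Dict.get?_insert_self] at h
          obtain rfl := (Option.some.injEq .. ▸ h : ((iN : Nat) : Int) = v).symm
          exact ⟨iN, rfl, hiN, hfs g (by simp)⟩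
        · rw [howner1, PySem.Dict.get?_insert_of_ne owner ((iN : Nat) : Int) hgf] at h
          exact hOwS g v h
      obtain ⟨Rlen, ROwPres, ROwS, Rmono, RSound, RComp⟩ :=
        ih lab owner1 hlen (fun g hg => hfs g (by simp [hg])) hOwS1 hSound
      refine ⟨Rlen, fun g v h => ROwPres g v (hOwPres1 g v h), ROwS, Rmono, RSound, ?_⟩
      intro g hg
      rcases List.mem_cons.mp hg with rfl | hg'
      · exact ⟨iN, hiN, ROwPres g _ (by rw [howner1, PySem.Dict.get?_insert_self]), rfl⟩
      · exact RComp g hg'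

lemma pvRange_getD {n z : Nat} (hz : z < n) :
    (PySem.List.pyRange 0 (n : Int) 1).getD z 0 = (z : Int) := by
  have hlen : (PySem.List.pyRange 0 (n : Int) 1).length = n := by
    rw [PySem.List.length_pyRange_one]; simp
  rw [List.getD_eq_getElem?_getD, List.getElem?_eq_getElem (by omega),
      PySem.List.getElem_pyRange_one]
  simp

lemma pvBOuter (af : List ((List (String × String)) × List String)) :
    ∀ (rest : List ((List (String × String)) × List String)) (sN : Nat)
      (lab : List Int) (owner : PySem.Dict String Int),
    af.drop sN = rest →
    lab.length = af.length →
    (∀ f v, owner.get? f = some v →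
      ∃ jN : Nat, v = ((jN : Nat) : Int) ∧ jN < af.length ∧ f ∈ (af.getD jN ([], [])).2) →
    (∀ z w, z < af.length → w < af.length → pvKeyB lab z = pvKeyB lab w →
      Relation.EqvGen (pvOv af) z w) →
    (∀ a, a < sN → a < af.length → ∀ f ∈ (af.getD a ([], [])).2,
      ∃ jN : Nat, jN < af.length ∧ owner.get? f = some ((jN : Nat) : Int) ∧
        pvKeyB lab a = pvKeyB lab jN) →
    ((PySem.List.enumerate rest ((sN : Nat) : Int)).foldl
        (fun (st : List Int × PySem.Dict String Int) p =>
          p.2.2.foldl (fun (st : List Int × PySem.Dict String Int) f =>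
            match st.2.get? f with
            | some j => (pvMergeLabels st.1 (PySem.List.pyGetD st.1 p.1 0)
                (PySem.List.pyGetD st.1 j 0), st.2)
            | none => (st.1, st.2.insert f p.1)) st) (lab, owner)).1.length = af.length ∧
    (∀ z w, z < af.length → w < af.length →
      pvKeyB ((PySem.List.enumerate rest ((sN : Nat) : Int)).foldl
        (fun (st : List Int × PySem.Dict String Int) p =>
          p.2.2.foldl (fun (st : List Int × PySem.Dict String Int) f =>
            match st.2.get? f with
            | some j => (pvMergeLabels st.1 (PySem.List.pyGetD st.1 p.1 0)
                (PySem.List.pyGetD st.1 j 0), st.2)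
            | none => (st.1, st.2.insert f p.1)) st) (lab, owner)).1 z
      = pvKeyB ((PySem.List.enumerate rest ((sN : Nat) : Int)).foldl
        (fun (st : List Int × PySem.Dict String Int) p =>
          p.2.2.foldl (fun (st : List Int × PySem.Dict String Int) f =>
            match st.2.get? f with
            | some j => (pvMergeLabels st.1 (PySem.List.pyGetD st.1 p.1 0)
                (PySem.List.pyGetD st.1 j 0), st.2)
            | none => (st.1, st.2.insert f p.1)) st) (lab, owner)).1 w →
      Relation.EqvGen (pvOv af) z w) ∧
    (∀ a, a < af.length → ∀ f ∈ (af.getD a ([], [])).2,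
      ∃ jN : Nat, jN < af.length ∧
        ((PySem.List.enumerate rest ((sN : Nat) : Int)).foldl
          (fun (st : List Int × PySem.Dict String Int) p =>
            p.2.2.foldl (fun (st : List Int × PySem.Dict String Int) f =>
              match st.2.get? f with
              | some j => (pvMergeLabels st.1 (PySem.List.pyGetD st.1 p.1 0)
                  (PySem.List.pyGetD st.1 j 0), st.2)
              | none => (st.1, st.2.insert f p.1)) st) (lab, owner)).2.get? f
          = some ((jN : Nat) : Int) ∧
        pvKeyB ((PySem.List.enumerate rest ((sN : Nat) : Int)).foldl
          (fun (st : List Int × PySem.Dict String Int) p =>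
            p.2.2.foldl (fun (st : List Int × PySem.Dict String Int) f =>
              match st.2.get? f with
              | some j => (pvMergeLabels st.1 (PySem.List.pyGetD st.1 p.1 0)
                  (PySem.List.pyGetD st.1 j 0), st.2)
              | none => (st.1, st.2.insert f p.1)) st) (lab, owner)).1 a
        = pvKeyB ((PySem.List.enumerate rest ((sN : Nat) : Int)).foldl
          (fun (st : List Int × PySem.Dict String Int) p =>
            p.2.2.foldl (fun (st : List Int × PySem.Dict String Int) f =>
              match st.2.get? f with
              | some j => (pvMergeLabels st.1 (PySem.List.pyGetD st.1 p.1 0)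
                  (PySem.List.pyGetD st.1 j 0), st.2)
              | none => (st.1, st.2.insert f p.1)) st) (lab, owner)).1 jN) := by
  intro rest
  induction rest with
  | nil =>
    intro sN lab owner hdrop hlen hOwS hSound hComp
    have hsN : af.length ≤ sN := by
      have := congrArg List.length hdrop
      rw [List.length_drop] at this
      simp at this
      omega
    simp only [PySem.List.enumerate_nil, List.foldl_nil]
    exact ⟨hlen, hSound, fun a ha f hf => hComp a (by omega) ha f hf⟩
  | cons x rest' ih =>
    intro sN lab owner hdrop hlen hOwS hSound hComp
    have hlenx : af.length - sN = rest'.length + 1 := by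
      have := congrArg List.length hdrop
      rw [List.length_drop] at this
      simpa using this
    have hsN : sN < af.length := by omega
    have hx : af.getD sN ([], []) = x := by
      have h0 : (af.drop sN)[0]? = some x := by rw [hdrop]; rfl
      rw [List.getElem?_drop, Nat.add_zero] at h0
      rw [List.getD_eq_getElem?_getD, h0]
      rfl
    have hdrop' : af.drop (sN + 1) = rest' := by
      have : af.drop (sN + 1) = (af.drop sN).drop 1 := by
        rw [List.drop_drop]
      rw [this, hdrop]
      rfl
    rw [PySem.List.enumerate_cons, List.foldl_cons]
    obtain ⟨Rlen, ROwPres, ROwS, Rmono, RSound, RComp⟩ :=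
      pvBInner af sN hsN x.2 lab owner hlen
        (by intro f hf; rw [hx]; exact hf) hOwS hSound
    have hcast : ((sN : Nat) : Int) + 1 = (((sN + 1 : Nat)) : Int) := by push_cast; ring
    rw [hcast]
    refine ih (sN + 1) _ _ hdrop' Rlen ROwS RSound ?_
    intro a ha han f hf
    rcases Nat.lt_or_ge a sN with h | h
    · obtain ⟨jN, hjN, hget, hkey⟩ := hComp a h han f hf
      exact ⟨jN, hjN, ROwPres f _ hget, Rmono a jN han (by omega) hkey⟩
    · have haeq : a = sN := by omega
      subst haeq
      have hfx : f ∈ x.2 := by rw [← hx]; exact hf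
      obtain ⟨jN, hjN, hget, hkey⟩ := RComp f hfx
      exact ⟨jN, hjN, hget, hkey⟩

-- ===== final characterization of B's labels, and the main equivalence =====

lemma pvBChar (af : List ((List (String × String)) × List String)) :
    ((PySem.List.enumerate af 0).foldl
        (fun (st : List Int × PySem.Dict String Int) p =>
          p.2.2.foldl (fun (st : List Int × PySem.Dict String Int) f =>
            match st.2.get? f with
            | some j => (pvMergeLabels st.1 (PySem.List.pyGetD st.1 p.1 0)
                (PySem.List.pyGetD st.1 j 0), st.2)
            | none => (st.1, st.2.insert f p.1)) st)
        (PySem.List.pyRange 0 (af.length : Int) 1, PySem.Dict.mk [])).1.length = af.length ∧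
    (∀ z w, z < af.length → w < af.length →
      (pvKeyB ((PySem.List.enumerate af 0).foldl
        (fun (st : List Int × PySem.Dict String Int) p =>
          p.2.2.foldl (fun (st : List Int × PySem.Dict String Int) f =>
            match st.2.get? f with
            | some j => (pvMergeLabels st.1 (PySem.List.pyGetD st.1 p.1 0)
                (PySem.List.pyGetD st.1 j 0), st.2)
            | none => (st.1, st.2.insert f p.1)) st)
        (PySem.List.pyRange 0 (af.length : Int) 1, PySem.Dict.mk [])).1 z
      = pvKeyB ((PySem.List.enumerate af 0).foldl
        (fun (st : List Int × PySem.Dict String Int) p =>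
          p.2.2.foldl (fun (st : List Int × PySem.Dict String Int) f =>
            match st.2.get? f with
            | some j => (pvMergeLabels st.1 (PySem.List.pyGetD st.1 p.1 0)
                (PySem.List.pyGetD st.1 j 0), st.2)
            | none => (st.1, st.2.insert f p.1)) st)
        (PySem.List.pyRange 0 (af.length : Int) 1, PySem.Dict.mk [])).1 w
      ↔ Relation.EqvGen (pvOv af) z w)) := by
  have hlen0 : (PySem.List.pyRange 0 (af.length : Int) 1).length = af.length := by
    rw [PySem.List.length_pyRange_one]; simp
  have hOwS0 : ∀ f v, (PySem.Dict.mk ([] : List (String × Int))).get? f = some v →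
      ∃ jN : Nat, v = ((jN : Nat) : Int) ∧ jN < af.length ∧ f ∈ (af.getD jN ([], [])).2 := by
    intro f v h
    simp [PySem.Dict.get?] at h
  have hSound0 : ∀ z w, z < af.length → w < af.length →
      pvKeyB (PySem.List.pyRange 0 (af.length : Int) 1) z
        = pvKeyB (PySem.List.pyRange 0 (af.length : Int) 1) w →
      Relation.EqvGen (pvOv af) z w := by
    intro z w hz hw h
    unfold pvKeyB at h
    rw [pvRange_getD hz, pvRange_getD hw] at h
    have : z = w := by exact_mod_cast h
    subst this
    exact (Relation.EqvGen.is_equivalence _).refl z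
  have h0 : ((0 : Nat) : Int) = (0 : Int) := rfl
  have hmain := pvBOuter af af 0 (PySem.List.pyRange 0 (af.length : Int) 1)
    (PySem.Dict.mk []) List.drop_zero hlen0 hOwS0 hSound0 (by omega)
  rw [h0] at hmain
  obtain ⟨hlenF, hSoundF, hCompF⟩ := hmain
  refine ⟨hlenF, ?_⟩
  intro z w hz hw
  constructor
  · exact hSoundF z w hz hw
  · intro h
    clear hz hw
    induction h with
    | rel a b hab =>
      obtain ⟨ha, hb, f, hfa, hfb⟩ := hab
      obtain ⟨j1, hj1, hg1, hk1⟩ := hCompF a ha f hfa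
      obtain ⟨j2, hj2, hg2, hk2⟩ := hCompF b hb f hfb
      have : j1 = j2 := by
        rw [hg1] at hg2
        exact_mod_cast Option.some.inj hg2
      rw [hk1, hk2, this]
    | refl a => rfl
    | symm a b _ ihab => exact ihab.symm
    | trans a b c _ _ ih1 ih2 => exact ih1.trans ih2

theorem pvMainEq (af : List ((List (String × String)) × List String)) :
    group_by_file_overlap_py af = group_by_file_overlap_py_alt af := by
  by_cases hn : af.length = 0
  · obtain rfl := List.length_eq_zero_iff.mp hn
    rfl
  · -- names for the two final states
    obtain ⟨hwfF, hlenF, hcharA⟩ := pvAChar af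
    obtain ⟨hlenB, hcharB⟩ := pvBChar af
    set parentF := (pvPairs (af.length : Int)).foldl (pvStepA af)
      (PySem.List.pyRange 0 (af.length : Int) 1) with hparentF
    set labF := ((PySem.List.enumerate af 0).foldl
        (fun (st : List Int × PySem.Dict String Int) p =>
          p.2.2.foldl (fun (st : List Int × PySem.Dict String Int) f =>
            match st.2.get? f with
            | some j => (pvMergeLabels st.1 (PySem.List.pyGetD st.1 p.1 0)
                (PySem.List.pyGetD st.1 j 0), st.2)
            | none => (st.1, st.2.insert f p.1)) st)
        (PySem.List.pyRange 0 (af.length : Int) 1, PySem.Dict.mk [])).1 with hlabF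
    -- A's result as a grouping by final roots
    have hA : group_by_file_overlap_py af
        = (pvGrp (fun idx => ((pvRoot parentF idx.toNat : Nat) : Int))
            (PySem.List.pyRange 0 (af.length : Int) 1)).values.map
          (fun indices => indices.map (fun index => PySem.List.pyGetD af index ([], []))) := by
      rw [group_by_file_overlap_py]
      rw [if_neg (by exact_mod_cast hn)]
      dsimp only
      have hnest : (PySem.List.pyRange 0 (af.length : Int) 1).foldl
          (fun par left => (PySem.List.pyRange (left + 1) (af.length : Int) 1).foldl
            (fun par right =>
              if PySem.Set.inter (PySem.List.pyGetD af left ([], [])).2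
                  (PySem.List.pyGetD af right ([], [])).2 ≠ [] then
                pvUnionA par left right
              else par) par) (PySem.List.pyRange 0 (af.length : Int) 1)
          = parentF := by
        rw [hparentF, pvPairs, List.foldl_flatMap]
        apply PySem.List.foldl_congr_mem
        intro acc l _
        rw [List.foldl_map]
        rfl
      rw [hnest]
      have hgrp := pvAGroup (PySem.List.pyRange 0 (af.length : Int) 1) parentF
        (PySem.Dict.mk []) hwfF
        (by
          intro idx hidx
          rw [PySem.List.mem_pyRange_one] at hidx
          exact ⟨idx.toNat, by omega, by omega⟩)
      rw [hgrp]
      rfl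
    have hB : group_by_file_overlap_py_alt af
        = (pvGrp (fun idx => PySem.List.pyGetD labF idx 0)
            (PySem.List.pyRange 0 (af.length : Int) 1)).values.map
          (fun g => g.map (fun i => PySem.List.pyGetD af i ([], []))) := by
      rw [group_by_file_overlap_py_alt]
      rfl
    rw [hA, hB]
    have hvals : (pvGrp (fun idx => ((pvRoot parentF idx.toNat : Nat) : Int))
            (PySem.List.pyRange 0 (af.length : Int) 1)).values
        = (pvGrp (fun idx => PySem.List.pyGetD labF idx 0)
            (PySem.List.pyRange 0 (af.length : Int) 1)).values := by
      apply pvGrp_values_eq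
      intro a b ha hb
      rw [PySem.List.mem_pyRange_one] at ha hb
      obtain ⟨aN, rfl⟩ : ∃ aN : Nat, a = (aN : Int) := ⟨a.toNat, by omega⟩
      obtain ⟨bN, rfl⟩ : ∃ bN : Nat, b = (bN : Int) := ⟨b.toNat, by omega⟩
      have haN : aN < af.length := by omega
      have hbN : bN < af.length := by omega
      rw [Int.toNat_natCast, Int.toNat_natCast,
          PySem.List.pyGetD_natCast, PySem.List.pyGetD_natCast]
      have h1 : ((pvRoot parentF aN : Nat) : Int) = ((pvRoot parentF bN : Nat) : Int)
          ↔ pvRoot parentF aN = pvRoot parentF bN := Int.natCast_inj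
      rw [h1, hcharA aN bN haN hbN, ← hcharB aN bN haN hbN]
      rfl
    rw [hvals]


-- ===== VERDICT (by name: the statement is the Claim_ definition above) =====
theorem group_by_file_overlap_py_spec : Claim_equal_group_by_file_overlap_py := by
  intro action_files _
  unfold Spec_group_by_file_overlap_py
  exact pvMainEq action_files
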